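-- pv_equiv track=rewrite | github.com/sangeethsanthosh-git/AEROSENSE-MACTRONS | app.py | classify_short_long_words
-- ===== SOURCE A (Python) =====
-- def classify_short_long_words(tokens):
--     alpha = [t for t in tokens if any(ch.isalpha() for ch in t)]
--     short = [t for t in alpha if len(t) <= 2]
--     longw = [t for t in alpha if len(t) >= 8]
--     return {
--         "short": sorted(set(short)),
--         "long": sorted(set(longw))
--     }
-- ===== SOURCE B (Python) =====
-- def classify_short_long_words(tokens):
--     short, longw = [], []
--     for t in sorted(set(tokens)):
--         if any(ch.isalpha() for ch in t):
--             n = len(t)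
--             if n <= 2:
--                 short.append(t)
--             elif n >= 8:
--                 longw.append(t)
--     return {"short": short, "long": longw}
-- ===== Notes on version B (the rewrite author's own statement) =====
-- stated objective: alternative
-- what changed: A filters three times and then deduplicates and sorts each bucket separately; B deduplicates and sorts the tokens once up front and does a single scan of that sorted unique list, appending into the two result lists which are therefore already sorted (no per-bucket set building or sorting).
import Mathlib
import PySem

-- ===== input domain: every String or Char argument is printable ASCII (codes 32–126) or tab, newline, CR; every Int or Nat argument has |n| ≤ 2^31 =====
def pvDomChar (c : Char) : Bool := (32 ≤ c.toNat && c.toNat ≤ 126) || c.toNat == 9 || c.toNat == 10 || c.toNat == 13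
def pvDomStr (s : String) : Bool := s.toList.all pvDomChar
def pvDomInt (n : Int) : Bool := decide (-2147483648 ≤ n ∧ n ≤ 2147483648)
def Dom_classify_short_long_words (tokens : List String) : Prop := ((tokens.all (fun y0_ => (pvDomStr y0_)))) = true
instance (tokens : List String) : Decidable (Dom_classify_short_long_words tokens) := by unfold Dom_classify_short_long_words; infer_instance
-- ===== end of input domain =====

-- B sorts the deduplicated tokens once up front and classifies in a single scan of the sorted unique list, so the buckets come out sorted without per-bucket set+sort (alternative decomposition, same asymptotic cost).


-- ===== PORT A =====
def classify_short_long_words (tokens : List String) : List (String × List String) :=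
  let alpha := tokens.filter (fun t => t.toList.any PySem.Chars.isalpha)
  let short := alpha.filter (fun t => decide (PySem.Str.len t ≤ 2))
  let longw := alpha.filter (fun t => decide (8 ≤ PySem.Str.len t))
  [("short", PySem.List.sorted (PySem.Set.ofList short) (fun x => x) false),
   ("long", PySem.List.sorted (PySem.Set.ofList longw) (fun x => x) false)]

-- ===== PORT B =====
def classify_short_long_words_alt (tokens : List String) : List (String × List String) :=
  let p := (PySem.List.sorted (PySem.Set.ofList tokens) (fun x => x) false).foldl
    (fun (acc : List String × List String) t =>
      if t.toList.any PySem.Chars.isalpha then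
        let n := PySem.Str.len t
        if n ≤ 2 then (acc.1 ++ [t], acc.2)
        else if 8 ≤ n then (acc.1, acc.2 ++ [t])
        else acc
      else acc)
    ([], [])
  [("short", p.1), ("long", p.2)]

-- ===== PRECONDITION & SPEC =====
def Spec_classify_short_long_words (tokens : List String) (out : List (String × List String)) : Prop := out = classify_short_long_words_alt tokens
instance (tokens : List String) (out : List (String × List String)) : Decidable (Spec_classify_short_long_words tokens out) := by unfold Spec_classify_short_long_words; infer_instance

-- ===== CLAIM (what is proved, stated in full; the proofs are below) =====
def Claim_equal_classify_short_long_words : Prop := ∀ (tokens : List String), Dom_classify_short_long_words tokens → Spec_classify_short_long_words tokens (classify_short_long_words tokens)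

-- ===== LEMMAS AND PROOFS =====

-- B's single scan from accumulators (s0, l0) appends exactly the two (disjoint) length-band filters of the scanned list.
lemma scanFold_eq (l : List String) (s0 l0 : List String) :
    l.foldl
      (fun (acc : List String × List String) t =>
        if t.toList.any PySem.Chars.isalpha then
          let n := PySem.Str.len t
          if n ≤ 2 then (acc.1 ++ [t], acc.2)
          else if 8 ≤ n then (acc.1, acc.2 ++ [t])
          else acc
        else acc)
      (s0, l0)
    = (s0 ++ l.filter (fun t => t.toList.any PySem.Chars.isalpha && decide (PySem.Str.len t ≤ 2)),
       l0 ++ l.filter (fun t => t.toList.any PySem.Chars.isalpha && decide (8 ≤ PySem.Str.len t))) := by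
  induction l generalizing s0 l0 with
  | nil => simp
  | cons t ts ih =>
    rw [List.foldl_cons]
    by_cases ha : t.toList.any PySem.Chars.isalpha
    · by_cases h2 : PySem.Str.len t ≤ 2
      · have h2n : t.length ≤ 2 := by
          simp [PySem.Str.len_eq] at h2; exact_mod_cast h2
        have h8n : t.length < 8 := by omega
        simp only [ha, if_true, if_pos h2]
        rw [ih]
        simp [ha, h2n, h8n]
      · by_cases h8 : 8 ≤ PySem.Str.len t
        · have h8n : 8 ≤ t.length := by
            simp [PySem.Str.len_eq] at h8; exact_mod_cast h8
          have h2n : 2 < t.length := by omega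
          simp only [ha, if_true, if_neg h2, if_pos h8]
          rw [ih]
          simp [ha, h2n, h8n]
        · have h2n : 2 < t.length := by
            simp [PySem.Str.len_eq] at h2; exact_mod_cast h2
          have h8n : t.length < 8 := by
            simp [PySem.Str.len_eq] at h8; exact_mod_cast h8
          simp only [ha, if_true, if_neg h2, if_neg h8]
          rw [ih]
          simp only [List.filter_cons]
          simp [h2n, h8n]
    · simp only [Bool.not_eq_true] at ha
      rw [if_neg (by simp [ha]), ih]
      simp [ha]

-- removing one element that fails p does not change the p-filter
lemma filter_discard_of_false {p : String → Bool} {x : String} (hx : p x = false) (l : List String) :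
    (PySem.Set.discard l x).filter p = l.filter p := by
  simp only [PySem.Set.discard, List.filter_filter]
  exact List.filter_congr (fun y _ => by by_cases h : y = x <;> simp [h, hx])

lemma discard_filter (l : List String) (x : String) (p : String → Bool) :
    PySem.Set.discard (l.filter p) x = (PySem.Set.discard l x).filter p := by
  simp only [PySem.Set.discard, List.filter_filter]
  exact List.filter_congr (fun y _ => by by_cases h : p y <;> simp [h, Bool.and_comm])

-- first-occurrence dedup commutes with filter
lemma ofList_filter (p : String → Bool) (xs : List String) :
    PySem.Set.ofList (xs.filter p) = (PySem.Set.ofList xs).filter p := by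
  induction xs with
  | nil => simp
  | cons x xs ih =>
    by_cases hx : p x
    · rw [List.filter_cons_of_pos hx, PySem.Set.ofList_cons, PySem.Set.ofList_cons,
          List.filter_cons_of_pos hx, ih, discard_filter]
    · rw [List.filter_cons_of_neg (by simp [hx]), PySem.Set.ofList_cons,
          List.filter_cons_of_neg (by simp [hx]), ih,
          filter_discard_of_false (by simpa using hx)]

-- sorting the dedup of a filter = filtering the sorted dedup
lemma sorted_ofList_filter (p : String → Bool) (xs : List String) :
    PySem.List.sorted (PySem.Set.ofList (xs.filter p)) (fun x => x) false
      = (PySem.List.sorted (PySem.Set.ofList xs) (fun x => x) false).filter p := by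
  apply PySem.List.sorted_eq_of_perm_of_pairwise_lt
  · rw [ofList_filter]
    exact (PySem.List.sorted_perm _ _ _).filter p
  · exact (PySem.List.sorted_ofList_pairwise_lt xs).filter p

lemma filter_combine (p q : String → Bool) (xs : List String) :
    (xs.filter p).filter q = xs.filter (fun t => p t && q t) := by
  rw [List.filter_filter]
  exact List.filter_congr (fun t _ => by by_cases h : p t <;> simp [h])

-- ===== VERDICT (by name: the statement is the Claim_ definition above) =====
theorem classify_short_long_words_spec : Claim_equal_classify_short_long_words := by
  intro tokens _
  unfold Spec_classify_short_long_words classify_short_long_words classify_short_long_words_alt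
  rw [scanFold_eq]
  simp only [List.nil_append]
  rw [← sorted_ofList_filter, ← sorted_ofList_filter, ← filter_combine, ← filter_combine]
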